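-- pv_equiv track=rewrite | github.com/efran45/jira-split-analyzer | jira_split_analyzer.py | _category_first_partition
-- ===== SOURCE A (Python) =====
-- from collections import defaultdict
--
-- def analyze_user_disruption_multisite(sites: list[set], user_data: dict) -> dict:
--     """
--     Generalised user-impact analysis for any number of sites.
--
--     The primary metric is the number of users who need to log into more
--     than one site — the lower this number, the better the split.
--
--     Returns:
--         {
--             "labels":          ["A", "B", ...],
--             "sites":           [set_a, set_b, ...],
--             "site_users":      [users_on_a, users_on_b, ...],
--             "site_groups":     [groups_on_a, groups_on_b, ...],
--             "spanning_users":  set of users who appear on 2+ sites,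
--             "spanning_groups": set of groups that exist on 2+ sites,
--             "disruption_score": len(spanning_users),
--         }
--     """
--     labels = [chr(65 + i) for i in range(len(sites))]  # A, B, C, …
--     site_users: list[set] = []
--     site_groups: list[set] = []
--     for site in sites:
--         users: set = set()
--         groups: set = set()
--         for proj in site:
--             if proj in user_data:
--                 users  |= user_data[proj]["users"]
--                 groups |= user_data[proj]["groups"]
--         site_users.append(users)
--         site_groups.append(groups)
--
--     all_users  = set().union(*site_users)  if site_users  else set()
--     all_groups = set().union(*site_groups) if site_groups else set()
--
--     spanning_users  = {u for u in all_users  if sum(1 for s in site_users  if u in s) > 1}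
--     spanning_groups = {g for g in all_groups if sum(1 for s in site_groups if g in s) > 1}
--
--     return {
--         "labels":           labels,
--         "sites":            sites,
--         "site_users":       site_users,
--         "site_groups":      site_groups,
--         "spanning_users":   spanning_users,
--         "spanning_groups":  spanning_groups,
--         "disruption_score": len(spanning_users),
--     }
--
-- def user_disruption_score(sites: list[set], user_data: dict) -> int:
--     """Quick helper — returns just the disruption score (users needing 2+ logins)."""
--     if not user_data:
--         return 0
--     return analyze_user_disruption_multisite(sites, user_data)["disruption_score"]
--
-- def _category_first_partition(
--     project_keys: set[str],
--     project_categories: dict,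
--     user_data: dict,
--     n_sites: int,
-- ) -> list[set]:
--     """
--     Greedy category-first bin packing.
--
--     Treats each project category as an atomic unit (never split across sites).
--     Uncategorised projects are treated as individual units.
--     Each unit is assigned to whichever current site minimises user disruption,
--     with project-count balance as a tie-breaker.
--     """
--     by_cat: dict = defaultdict(set)
--     uncategorised: set = set()
--     for proj in project_keys:
--         cat = project_categories.get(proj, "")
--         if cat:
--             by_cat[cat].add(proj)
--         else:
--             uncategorised.add(proj)
--
--     units: list[set] = list(by_cat.values()) + [{p} for p in sorted(uncategorised)]
--     units.sort(key=len, reverse=True)   # largest first for better packing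
--
--     sites: list[set] = [set() for _ in range(n_sites)]
--     for unit in units:
--         best_i, best_val = 0, float("inf")
--         for i in range(n_sites):
--             trial = [set(s) for s in sites]
--             trial[i] |= unit
--             ud = user_disruption_score(trial, user_data)
--             balance = max(len(s) for s in trial) - min(len(s) for s in trial)
--             val = ud * 10_000 + balance
--             if val < best_val:
--                 best_val, best_i = val, i
--         sites[best_i] |= unit
--
--     return [s for s in sites if s]   # drop any empty sites
-- ===== SOURCE B (Python) =====
-- def _users_of(projects, user_data):
--     users = set()
--     for p in projects:
--         if p in user_data:
--             users |= user_data[p]["users"]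
--     return users
--
--
-- def _category_first_partition(
--     project_keys: set[str],
--     project_categories: dict,
--     user_data: dict,
--     n_sites: int,
-- ) -> list[set]:
--     """
--     Same greedy objective as the original, evaluated incrementally: instead of
--     copying every site and recomputing all per-site user sets for each trial,
--     we maintain `sites_of` (user -> set of site indices the user already
--     appears on).  Placing a unit on site i makes exactly those unit users span
--     who currently sit on exactly one site other than i, so each candidate is
--     scored by a delta over the unit's own users only.
--     """
--     by_cat: dict = {}
--     uncategorised: set = set()
--     for proj in project_keys:
--         cat = project_categories.get(proj, "")
--         if cat:
--             by_cat.setdefault(cat, set()).add(proj)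
--         else:
--             uncategorised.add(proj)
--
--     # deterministic unit order: categories by (size desc, min element), then
--     # the uncategorised singletons in sorted order
--     units = sorted(sorted(by_cat.values(), key=min), key=len, reverse=True)
--     units += [{p} for p in sorted(uncategorised)]
--
--     sites = [set() for _ in range(n_sites)]
--     sites_of: dict = {}   # user -> set of site indices the user appears on
--
--     for unit in units:
--         uusers = _users_of(unit, user_data)
--         spanning = sum(1 for s in sites_of.values() if len(s) > 1)
--
--         def value(i):
--             new_span = spanning + sum(
--                 1 for u in uusers
--                 if len(sites_of.get(u, ())) == 1 and i not in sites_of[u])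
--             lens = [len(sites[j] | unit) if j == i else len(sites[j])
--                     for j in range(n_sites)]
--             return new_span * 10_000 + max(lens) - min(lens)
--
--         best_i = min(range(n_sites), key=value)
--         sites[best_i] |= unit
--         for u in uusers:
--             sites_of.setdefault(u, set()).add(best_i)
--
--     return [s for s in sites if s]
-- ===== Notes on version B (the rewrite author's own statement) =====
-- stated objective: faster
-- what changed: B never rebuilds the partition to score a candidate: it maintains sites_of (user -> set of site indices the user already appears on) across the greedy loop and scores placing a unit on site i as current-spanning plus the number of the unit's own users sitting on exactly one site other than i, instead of A's copying every site, recomputing every per-site user set and re-scanning all sites per user for each of the n trials; …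
import Mathlib
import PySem

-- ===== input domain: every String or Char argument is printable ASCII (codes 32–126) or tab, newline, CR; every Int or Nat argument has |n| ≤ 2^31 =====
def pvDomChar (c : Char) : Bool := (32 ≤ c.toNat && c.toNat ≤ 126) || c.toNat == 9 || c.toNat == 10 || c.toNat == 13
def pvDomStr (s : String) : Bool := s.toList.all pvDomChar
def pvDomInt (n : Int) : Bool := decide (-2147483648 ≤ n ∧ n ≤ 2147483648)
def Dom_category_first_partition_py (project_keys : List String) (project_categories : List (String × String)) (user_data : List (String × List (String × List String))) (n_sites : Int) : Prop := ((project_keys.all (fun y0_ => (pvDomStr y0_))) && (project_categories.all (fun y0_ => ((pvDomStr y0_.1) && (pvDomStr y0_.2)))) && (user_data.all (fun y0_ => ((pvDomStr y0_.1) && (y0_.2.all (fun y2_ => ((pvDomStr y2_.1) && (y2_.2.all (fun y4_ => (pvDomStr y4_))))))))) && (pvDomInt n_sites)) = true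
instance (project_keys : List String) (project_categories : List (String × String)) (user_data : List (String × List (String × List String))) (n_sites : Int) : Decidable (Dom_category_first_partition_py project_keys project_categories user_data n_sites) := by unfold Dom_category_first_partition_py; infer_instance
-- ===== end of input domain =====

-- B replaces A's rebuild-and-rescore evaluation (copy every site, recompute every per-site
-- user set, re-scan all sites per user, for each of the n trial placements) by an
-- incremental state: a map user → set of sites the user already appears on, from which a
-- candidate placement is scored as current-spanning plus a delta over the unit's own users.
-- Pre_ excludes the inputs where A raises and the equal-sized-category ties on which A's
-- answer depends on Python's set iteration order.

-- ===== PORT A =====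

-- shared input decoding: the Python arguments arrive as dicts/sets (built before either
-- algorithm runs), so both ports decode them with the same helpers
def pvUdDict (user_data : List (String × List (String × List String))) :
    PySem.Dict String (PySem.Dict String (List String)) :=
  PySem.Dict.ofList (user_data.map (fun pd => (pd.1, PySem.Dict.ofList pd.2)))

-- inner loop of analyze_user_disruption_multisite: users |= user_data[proj]["users"]
-- (the ["users"] lookup is total via getD []; Python raises KeyError there — outside Pre_)
def pvSiteUsersA (ud : PySem.Dict String (PySem.Dict String (List String)))
    (site : List String) : List String :=
  site.foldl (fun users p =>
    if ud.contains p then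
      PySem.Set.union users (((ud.get? p).getD PySem.Dict.empty).getD "users" [])
    else users) PySem.Set.empty

-- user_disruption_score (incl. its `if not user_data: return 0` guard) ∘ analyze…:
-- only the "disruption_score" entry of the returned dict is ever used; labels and the
-- groups mirror-computation never influence it (their only Python effect, a KeyError on a
-- missing "groups" key, is excluded by Pre_), so the port computes the score directly.
def pvScoreA (ud : PySem.Dict String (PySem.Dict String (List String)))
    (sites : List (List String)) : Int :=
  if ud.size = 0 then 0
  else
    let site_users := sites.map (pvSiteUsersA ud)
    let all_users := site_users.foldl (fun a s => PySem.Set.union a s) PySem.Set.empty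
    let spanning := all_users.filter (fun u =>
      ((site_users.map (fun s => if PySem.Set.contains s u then (1 : Int) else 0)).sum) > 1)
    (spanning.length : Int)

-- one iteration of A's placement loop: try the unit on every site (full trial copy,
-- full rescore), keep the running best, then place the unit there
def pvPlaceUnitA (ud : PySem.Dict String (PySem.Dict String (List String))) (n : Int)
    (sites : List (List String)) (unit : List String) : List (List String) :=
  -- best_i, best_val = 0, float("inf"): the float sentinel is only "no value yet" → Option
  let best := (PySem.List.pyRange 0 n 1).foldl (fun (best : Int × Option Int) i =>
      let trial := sites.map (fun s => PySem.Set.ofList s)   -- [set(s) for s in sites]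
      let trial := PySem.List.pySetD trial i
        (PySem.Set.union (PySem.List.pyGetD trial i PySem.Set.empty) unit)
      let udv := pvScoreA ud trial
      let lens := trial.map (fun s => (s.length : Int))
      -- max()/min() raise on an empty list ([] is unreachable inside this loop);
      -- ported total via maxD/minD with default 0
      let bal := PySem.List.maxD lens (fun x => x) 0 - PySem.List.minD lens (fun x => x) 0
      let v := udv * 10000 + bal
      match best.2 with
      | none => (i, some v)
      | some bv => if v < bv then (i, some v) else best) ((0 : Int), (none : Option Int))
  -- sites[best_i] |= unit (IndexError when sites == [] — outside Pre_)
  PySem.List.pySetD sites best.1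
    (PySem.Set.union (PySem.List.pyGetD sites best.1 PySem.Set.empty) unit)

def category_first_partition_py (project_keys : List String) (project_categories : List (String × String)) (user_data : List (String × List (String × List String))) (n_sites : Int) : List (List String) :=
  let pcD := PySem.Dict.ofList project_categories
  let udD := pvUdDict user_data
  let keys : PySem.Set String := PySem.Set.ofList project_keys
  -- by_cat / uncategorised loop (defaultdict(set) → Dict.modify with default empty set)
  let st := keys.foldl (fun (st : PySem.Dict String (List String) × PySem.Set String) proj =>
      let cat := pcD.getD proj ""
      if cat ≠ "" then (st.1.modify cat PySem.Set.empty (fun s => PySem.Set.add s proj), st.2)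
      else (st.1, PySem.Set.add st.2 proj)) (PySem.Dict.empty, PySem.Set.empty)
  let units := st.1.values ++
      (PySem.List.sorted st.2 (fun x => x) false).map (fun p => PySem.Set.add PySem.Set.empty p)
  let units := PySem.List.sorted units (fun u => (u.length : Int)) true
  let sites0 : List (List String) := (PySem.List.pyRange 0 n_sites 1).map (fun _ => PySem.Set.empty)
  let sites := units.foldl (pvPlaceUnitA udD n_sites) sites0
  sites.filter (fun s => !s.isEmpty)

-- ===== PORT B =====

-- _users_of(projects, user_data) of Source B
def pvUsersOfB (ud : PySem.Dict String (PySem.Dict String (List String)))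
    (projects : List String) : List String :=
  projects.foldl (fun users p =>
    if ud.contains p then
      PySem.Set.union users (((ud.get? p).getD PySem.Dict.empty).getD "users" [])
    else users) PySem.Set.empty

-- value(i) of Source B: spanning + delta over the unit's users, plus the balance term
-- (sites_of.get(u, ()) → Dict.getD with the empty set; max()/min() raise on an empty
-- list, i.e. n_sites < 1 — outside Pre_; ported total via maxD/minD with default 0)
def pvValueB (sites : List (List String)) (sitesOf : PySem.Dict String (List Int))
    (spanning : Int) (uusers unit : List String) (n : Int) (i : Int) : Int :=
  let new_span := spanning + (uusers.map (fun u =>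
      if (sitesOf.getD u PySem.Set.empty).length = 1 ∧
         ¬ (i ∈ sitesOf.getD u PySem.Set.empty) then (1 : Int) else 0)).sum
  let lens := (PySem.List.pyRange 0 n 1).map (fun j =>
      if j = i then ((PySem.Set.union (PySem.List.pyGetD sites i PySem.Set.empty) unit).length : Int)
      else ((PySem.List.pyGetD sites j PySem.Set.empty).length : Int))
  new_span * 10000 + PySem.List.maxD lens (fun x => x) 0 - PySem.List.minD lens (fun x => x) 0

-- one iteration of Source B's placement loop over the incremental state (sites, sites_of)
def pvPlaceUnitB (ud : PySem.Dict String (PySem.Dict String (List String))) (n : Int)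
    (st : List (List String) × PySem.Dict String (List Int)) (unit : List String) :
    List (List String) × PySem.Dict String (List Int) :=
  let uusers := pvUsersOfB ud unit
  -- spanning = sum(1 for s in sites_of.values() if len(s) > 1)
  let spanning := (st.2.values.map (fun s => if 1 < s.length then (1 : Int) else 0)).sum
  -- best_i = min(range(n_sites), key=value): raises on an empty range — outside Pre_
  let best := PySem.List.minD (PySem.List.pyRange 0 n 1)
      (fun i => pvValueB st.1 st.2 spanning uusers unit n i) 0
  -- sites[best_i] |= unit
  let sites' := PySem.List.pySetD st.1 best
      (PySem.Set.union (PySem.List.pyGetD st.1 best PySem.Set.empty) unit)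
  -- for u in uusers: sites_of.setdefault(u, set()).add(best_i)
  let sitesOf' := uusers.foldl
      (fun d u => d.modify u PySem.Set.empty (fun s => PySem.Set.add s best)) st.2
  (sites', sitesOf')

def category_first_partition_py_alt (project_keys : List String) (project_categories : List (String × String)) (user_data : List (String × List (String × List String))) (n_sites : Int) : List (List String) :=
  let pcD := PySem.Dict.ofList project_categories
  let udD := pvUdDict user_data
  let keys : PySem.Set String := PySem.Set.ofList project_keys
  let st := keys.foldl (fun (st : PySem.Dict String (List String) × PySem.Set String) proj =>
      let cat := pcD.getD proj ""
      if cat ≠ "" then (st.1.modify cat PySem.Set.empty (fun s => PySem.Set.add s proj), st.2)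
      else (st.1, PySem.Set.add st.2 proj)) (PySem.Dict.empty, PySem.Set.empty)
  -- sorted(sorted(by_cat.values(), key=min), key=len, reverse=True): min() of a unit is
  -- total via getD "" (units are never empty)
  let units := PySem.List.sorted
      (PySem.List.sorted st.1.values (fun u => (PySem.List.min? u (fun x => x)).getD "") false)
      (fun u => (u.length : Int)) true
  let units := units ++
      (PySem.List.sorted st.2 (fun x => x) false).map (fun p => PySem.Set.add PySem.Set.empty p)
  let sites0 : List (List String) := (PySem.List.pyRange 0 n_sites 1).map (fun _ => PySem.Set.empty)
  let st2 := units.foldl (pvPlaceUnitB udD n_sites) (sites0, PySem.Dict.empty)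
  st2.1.filter (fun s => !s.isEmpty)

-- ===== PRECONDITION & SPEC =====

-- category of a project, as both Pythons read it (dict.get(proj, ""))
def pvCatOf (project_categories : List (String × String)) (p : String) : String :=
  (PySem.Dict.ofList project_categories).getD p ""

-- how many distinct projects carry category c
def pvCatCount (project_keys : List String) (project_categories : List (String × String)) (c : String) : Nat :=
  (PySem.Set.ofList project_keys).countP (fun r => pvCatOf project_categories r == c)

-- Pre_ excludes (i) inputs where A raises: n_sites < 1 with a nonempty project set
-- (IndexError), or a project whose user_data entry lacks the "users" or "groups" key
-- (KeyError); and (ii) inputs with two distinct categories of equal project count, where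
-- A's output depends on Python's set iteration order (a hash-seed accident, not a value
-- B could match).
def Pre_category_first_partition_py (project_keys : List String) (project_categories : List (String × String)) (user_data : List (String × List (String × List String))) (n_sites : Int) : Prop :=
  (1 ≤ n_sites ∨ project_keys = []) ∧
  (∀ p ∈ project_keys,
    ((pvUdDict user_data).get? p).all
      (fun dd => dd.contains "users" && dd.contains "groups") = true) ∧
  (∀ p ∈ project_keys, ∀ q ∈ project_keys,
    pvCatOf project_categories p ≠ "" → pvCatOf project_categories q ≠ "" →
    pvCatOf project_categories p ≠ pvCatOf project_categories q →
    pvCatCount project_keys project_categories (pvCatOf project_categories p) ≠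
      pvCatCount project_keys project_categories (pvCatOf project_categories q))

instance (project_keys : List String) (project_categories : List (String × String)) (user_data : List (String × List (String × List String))) (n_sites : Int) : Decidable (Pre_category_first_partition_py project_keys project_categories user_data n_sites) := by
  unfold Pre_category_first_partition_py; infer_instance

def pvWitness_category_first_partition_py : List String × (List (String × String)) × (List (String × List (String × List String))) × Int :=
  (["p1", "p2"], [("p1", "c1")], [("p1", [("users", ["u1"]), ("groups", [])])], 2)

def Spec_category_first_partition_py (project_keys : List String) (project_categories : List (String × String)) (user_data : List (String × List (String × List String))) (n_sites : Int) (out : List (List String)) : Prop := out = category_first_partition_py_alt project_keys project_categories user_data n_sites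
instance (project_keys : List String) (project_categories : List (String × String)) (user_data : List (String × List (String × List String))) (n_sites : Int) (out : List (List String)) : Decidable (Spec_category_first_partition_py project_keys project_categories user_data n_sites out) := by unfold Spec_category_first_partition_py; infer_instance

-- ===== CLAIM (what is proved, stated in full; the proofs are below) =====
def Claim_equal_category_first_partition_py : Prop := ∀ (project_keys : List String) (project_categories : List (String × String)) (user_data : List (String × List (String × List String))) (n_sites : Int), Dom_category_first_partition_py project_keys project_categories user_data n_sites → Pre_category_first_partition_py project_keys project_categories user_data n_sites → Spec_category_first_partition_py project_keys project_categories user_data n_sites (category_first_partition_py project_keys project_categories user_data n_sites)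

-- ===== LEMMAS AND PROOFS =====

-- ---------- small facts about the primitives ----------

theorem pvUsers_same : pvSiteUsersA = pvUsersOfB := rfl

theorem pvRange_len (n : Int) : (PySem.List.pyRange 0 n 1).length = n.toNat := by
  rw [PySem.List.length_pyRange_one]; omega

theorem pvUsersOfB_nodup (ud : PySem.Dict String (PySem.Dict String (List String))) :
    ∀ (l : List String), (pvUsersOfB ud l).Nodup := by
  have aux : ∀ (l : List String) (acc : List String), acc.Nodup →
      (l.foldl (fun users p =>
        if ud.contains p then
          PySem.Set.union users (((ud.get? p).getD PySem.Dict.empty).getD "users" [])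
        else users) acc).Nodup := by
    intro l
    induction l with
    | nil => intro acc h; exact h
    | cons p t ih =>
        intro acc h
        simp only [List.foldl_cons]
        by_cases hc : ud.contains p
        · exact ih _ (by simp [hc]; exact PySem.Set.nodup_union _ _ h)
        · exact ih _ (by simp [hc]; exact h)
  intro l; exact aux l [] List.nodup_nil

theorem pvUsersOfB_empty_dict (ud : PySem.Dict String (PySem.Dict String (List String)))
    (h : ud.size = 0) (l : List String) : pvUsersOfB ud l = [] := by
  have hitems : ud.items = [] := List.length_eq_zero_iff.mp h
  have hc : ∀ p, ud.contains p = false := by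
    intro p; simp [PySem.Dict.contains, hitems]
  have aux : ∀ (l : List String) (acc : List String),
      (l.foldl (fun users p =>
        if ud.contains p then
          PySem.Set.union users (((ud.get? p).getD PySem.Dict.empty).getD "users" [])
        else users) acc) = acc := by
    intro l
    induction l with
    | nil => intro acc; rfl
    | cons p t ih => intro acc; simp only [List.foldl_cons, hc p]; simpa using ih acc
  exact aux l []

-- membership in the accumulated user set
theorem pvUsersOfB_mem (ud : PySem.Dict String (PySem.Dict String (List String)))
    (l : List String) (u : String) :
    u ∈ pvUsersOfB ud l ↔ ∃ p ∈ l, ud.contains p = true ∧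
      u ∈ ((ud.get? p).getD PySem.Dict.empty).getD "users" [] := by
  have aux : ∀ (l : List String) (acc : List String),
      u ∈ (l.foldl (fun users p =>
        if ud.contains p then
          PySem.Set.union users (((ud.get? p).getD PySem.Dict.empty).getD "users" [])
        else users) acc) ↔ u ∈ acc ∨ ∃ p ∈ l, ud.contains p = true ∧
          u ∈ ((ud.get? p).getD PySem.Dict.empty).getD "users" [] := by
    intro l
    induction l with
    | nil => intro acc; simp
    | cons p t ih =>
        intro acc
        by_cases hc : ud.contains p
        · simp only [List.foldl_cons, if_pos hc, ih, PySem.Set.mem_union]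
          constructor
          · rintro (⟨h | h⟩ | ⟨q, hq, h1, h2⟩)
            · exact Or.inl h
            · exact Or.inr ⟨p, by simp, hc, h⟩
            · exact Or.inr ⟨q, by simp [hq], h1, h2⟩
          · rintro (h | ⟨q, hq, h1, h2⟩)
            · exact Or.inl (Or.inl h)
            · rcases List.mem_cons.mp hq with rfl | hq
              · exact Or.inl (Or.inr h2)
              · exact Or.inr ⟨q, hq, h1, h2⟩
        · simp only [List.foldl_cons, if_neg hc, ih]
          constructor
          · rintro (h | ⟨q, hq, h1, h2⟩)
            · exact Or.inl h
            · exact Or.inr ⟨q, by simp [hq], h1, h2⟩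
          · rintro (h | ⟨q, hq, h1, h2⟩)
            · exact Or.inl h
            · rcases List.mem_cons.mp hq with rfl | hq
              · exact absurd h1 (by simp [hc])
              · exact Or.inr ⟨q, hq, h1, h2⟩
  rw [pvUsersOfB, aux]
  simp [PySem.Set.empty]

theorem pvUsersOfB_union (ud : PySem.Dict String (PySem.Dict String (List String)))
    (a b : List String) (u : String) :
    u ∈ pvUsersOfB ud (PySem.Set.union a b) ↔ u ∈ pvUsersOfB ud a ∨ u ∈ pvUsersOfB ud b := by
  simp only [pvUsersOfB_mem]
  constructor
  · rintro ⟨p, hp, h1, h2⟩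
    rcases (PySem.Set.mem_union _ _ _).mp hp with h | h
    · exact Or.inl ⟨p, h, h1, h2⟩
    · exact Or.inr ⟨p, h, h1, h2⟩
  · rintro (⟨p, hp, h1, h2⟩ | ⟨p, hp, h1, h2⟩)
    · exact ⟨p, (PySem.Set.mem_union _ _ _).mpr (Or.inl hp), h1, h2⟩
    · exact ⟨p, (PySem.Set.mem_union _ _ _).mpr (Or.inr hp), h1, h2⟩

-- ---------- generic counting lemmas ----------

theorem pvCountP_or (α : Type) (l : List α) (p q : α → Bool)
    (h : ∀ a ∈ l, ¬ (p a = true ∧ q a = true)) :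
    l.countP (fun a => p a || q a) = l.countP p + l.countP q := by
  induction l with
  | nil => rfl
  | cons a t ih =>
      have ht := ih (fun x hx => h x (by simp [hx]))
      have ha := h a (by simp)
      simp only [List.countP_cons, ht]
      by_cases hp : p a <;> by_cases hq : q a <;> simp [hp, hq] at ha ⊢ <;> omega

theorem pvCountP_eq_of_nodup (α : Type) [DecidableEq α] (l₁ l₂ : List α) (p : α → Bool)
    (h₁ : l₁.Nodup) (h₂ : l₂.Nodup) (h : ∀ a, p a = true → (a ∈ l₁ ↔ a ∈ l₂)) :
    l₁.countP p = l₂.countP p := by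
  rw [List.countP_eq_length_filter, List.countP_eq_length_filter]
  apply List.Perm.length_eq
  rw [List.perm_ext_iff_of_nodup (h₁.filter p) (h₂.filter p)]
  intro a
  simp only [List.mem_filter]
  constructor
  · rintro ⟨ha, hp⟩; exact ⟨(h a hp).mp ha, hp⟩
  · rintro ⟨ha, hp⟩; exact ⟨(h a hp).mpr ha, hp⟩

theorem pvCountP_set (α : Type) (w : α) : ∀ (l : List α) (k : Nat) (v : α) (p : α → Bool),
    k < l.length →
    (l.set k v).countP p + (if p (l.getD k w) then 1 else 0)
      = l.countP p + (if p v then 1 else 0) := by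
  intro l
  induction l with
  | nil => intro k v p hk; simp at hk
  | cons a t ih =>
      intro k v p hk
      cases k with
      | zero =>
          simp only [List.set_cons_zero, List.countP_cons, List.getD_cons_zero]
          by_cases hp : p a <;> by_cases hv : p v <;> simp [hp, hv] <;> omega
      | succ k =>
          have hk' : k < t.length := by simpa using hk
          have := ih k v p hk'
          simp only [List.set_cons_succ, List.countP_cons, List.getD_cons_succ]
          by_cases hp : p a <;> simp only [hp, if_true, if_false] <;> omega

theorem pvCountP_range (α : Type) (d : α) : ∀ (l : List α) (p : α → Bool),
    (List.range l.length).countP (fun k => p (l.getD k d)) = l.countP p := by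
  intro l
  induction l with
  | nil => intro p; rfl
  | cons a t ih =>
      intro p
      show (List.range (t.length + 1)).countP _ = _
      rw [List.range_succ_eq_map, List.countP_cons, List.countP_map]
      have : ((fun k => p ((a :: t).getD k d)) ∘ (fun n => n + 1)) = (fun k => p (t.getD k d)) := by
        funext k; simp [List.getD_cons_succ]
      rw [this, ih]
      simp [List.countP_cons, List.getD_cons_zero, Nat.add_comm]

-- ---------- the incremental state invariant ----------

-- number of sites whose projects involve user u
def pvCnt (ud : PySem.Dict String (PySem.Dict String (List String)))
    (sites : List (List String)) (u : String) : Nat :=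
  sites.countP (fun s => decide (u ∈ pvUsersOfB ud s))

-- the relation B's incremental state keeps with the partition itself
def pvInv (ud : PySem.Dict String (PySem.Dict String (List String))) (n : Int)
    (sites : List (List String)) (sitesOf : PySem.Dict String (List Int)) : Prop :=
  sites.length = n.toNat ∧ (∀ s ∈ sites, s.Nodup) ∧ sitesOf.keys.Nodup ∧
  (∀ u, (sitesOf.getD u PySem.Set.empty).Nodup) ∧
  (∀ u (j : Int), j ∈ sitesOf.getD u PySem.Set.empty ↔
    ∃ k : Nat, k < sites.length ∧ j = (k : Int) ∧ u ∈ pvUsersOfB ud (sites.getD k []))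

-- the length of sites_of[u] is the number of sites u appears on
theorem pvInv_len (ud : PySem.Dict String (PySem.Dict String (List String))) (n : Int)
    (sites : List (List String)) (sitesOf : PySem.Dict String (List Int))
    (h : pvInv ud n sites sitesOf) (u : String) :
    (sitesOf.getD u PySem.Set.empty).length = pvCnt ud sites u := by
  obtain ⟨-, -, -, hnd, hch⟩ := h
  have hL : (sitesOf.getD u PySem.Set.empty).Perm
      (((List.range sites.length).filter
        (fun k => decide (u ∈ pvUsersOfB ud (sites.getD k [])))).map Int.ofNat) := by
    rw [List.perm_ext_iff_of_nodup (hnd u) ?_]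
    · intro j
      rw [hch u j, List.mem_map]
      constructor
      · rintro ⟨k, hk, rfl, hm⟩
        exact ⟨k, List.mem_filter.mpr ⟨List.mem_range.mpr hk, by simpa using hm⟩, rfl⟩
      · rintro ⟨k, hkf, rfl⟩
        obtain ⟨hkr, hm⟩ := List.mem_filter.mp hkf
        exact ⟨k, List.mem_range.mp hkr, rfl, by simpa using hm⟩
    · exact ((List.nodup_range).filter _).map (fun a b hab => Int.ofNat.inj hab)
  rw [hL.length_eq, List.length_map, ← List.countP_eq_length_filter]
  exact pvCountP_range (List String) [] sites (fun s => decide (u ∈ pvUsersOfB ud s))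

-- membership of one site index in sites_of[u]
theorem pvInv_memk (ud : PySem.Dict String (PySem.Dict String (List String))) (n : Int)
    (sites : List (List String)) (sitesOf : PySem.Dict String (List Int))
    (h : pvInv ud n sites sitesOf) (u : String) (k : Nat) (hk : k < sites.length) :
    ((k : Int) ∈ sitesOf.getD u PySem.Set.empty) ↔ u ∈ pvUsersOfB ud (sites.getD k []) := by
  rw [h.2.2.2.2 u (k : Int)]
  constructor
  · rintro ⟨k', hk', he, hm⟩
    have : k' = k := by exact_mod_cast he.symm
    subst this; exact hm
  · intro hm; exact ⟨k, hk, rfl, hm⟩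

-- a user on at least one site is a key of sites_of
theorem pvInv_mem_keys (ud : PySem.Dict String (PySem.Dict String (List String))) (n : Int)
    (sites : List (List String)) (sitesOf : PySem.Dict String (List Int))
    (h : pvInv ud n sites sitesOf) (u : String)
    (hu : 1 ≤ pvCnt ud sites u) : u ∈ sitesOf.keys := by
  have hlen := pvInv_len ud n sites sitesOf h u
  by_contra hk
  have : sitesOf.get? u = none := (PySem.Dict.get?_eq_none_iff_not_mem_keys _ _).mpr hk
  have : sitesOf.getD u PySem.Set.empty = PySem.Set.empty := by
    rw [PySem.Dict.getD_eq_get?_getD, this]; rfl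
  rw [this] at hlen
  simp [PySem.Set.empty] at hlen
  omega

-- B's spanning accumulator counts exactly the users on 2+ sites
theorem pvInv_spanning (ud : PySem.Dict String (PySem.Dict String (List String))) (n : Int)
    (sites : List (List String)) (sitesOf : PySem.Dict String (List Int))
    (h : pvInv ud n sites sitesOf) :
    (sitesOf.values.map (fun s => if 1 < s.length then (1 : Int) else 0)).sum
      = (sitesOf.keys.countP (fun u => decide (1 < pvCnt ud sites u)) : Int) := by
  rw [PySem.Dict.values_eq_map_keys sitesOf h.2.2.1 PySem.Set.empty, List.map_map]
  have : ((fun s => if 1 < List.length s then (1 : Int) else 0) ∘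
      (fun k => sitesOf.getD k PySem.Set.empty))
      = fun u => if decide (1 < pvCnt ud sites u) = true then (1 : Int) else 0 := by
    funext u
    simp only [Function.comp, pvInv_len ud n sites sitesOf h u]
    by_cases hc : 1 < pvCnt ud sites u <;> simp [hc]
  rw [this, PySem.List.sum_map_ite_one_zero]

-- ---------- the score of a trial placement, incrementally ----------

theorem pvAll_eq_ofList_flatten (SU : List (List String)) :
    SU.foldl (fun a s => PySem.Set.union a s) PySem.Set.empty = PySem.Set.ofList SU.flatten := by
  rw [PySem.Set.ofList_eq_foldl, List.foldl_flatten]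
  rfl

theorem pvSum_ite (α : Type) (Q : α → Prop) [DecidablePred Q] (l : List α) :
    (l.map (fun a => if Q a then (1 : Int) else 0)).sum
      = (l.countP (fun a => decide (Q a)) : Int) := by
  rw [← PySem.List.sum_map_ite_one_zero (fun a => decide (Q a)) l]
  apply congrArg
  apply List.map_congr_left
  intro a _
  by_cases h : Q a <;> simp [h]

theorem pvMem_W (ud : PySem.Dict String (PySem.Dict String (List String)))
    (L : List (List String)) (u : String) :
    u ∈ PySem.Set.ofList (L.map (pvUsersOfB ud)).flatten ↔ ∃ s ∈ L, u ∈ pvUsersOfB ud s := by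
  rw [PySem.Set.mem_ofList, List.mem_flatten]
  constructor
  · rintro ⟨l, hl, hu⟩
    obtain ⟨s, hs, rfl⟩ := List.mem_map.mp hl
    exact ⟨s, hs, hu⟩
  · rintro ⟨s, hs, hu⟩
    exact ⟨pvUsersOfB ud s, List.mem_map.mpr ⟨s, hs, rfl⟩, hu⟩

-- a user on at least one site of sites also appears in the trial partition's user pool
theorem pvCnt_pos_mem (ud : PySem.Dict String (PySem.Dict String (List String)))
    (sites : List (List String)) (unit : List String) (k : Nat) (hk : k < sites.length)
    (u : String) (hu : 1 ≤ pvCnt ud sites u) :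
    ∃ s ∈ sites.set k (PySem.Set.union (sites[k]'hk) unit), u ∈ pvUsersOfB ud s := by
  obtain ⟨s, hs, hp⟩ := List.countP_pos_iff.mp (by omega : 0 < pvCnt ud sites u)
  obtain ⟨j, hj, rfl⟩ := List.mem_iff_getElem.mp hs
  by_cases hjk : j = k
  · subst hjk
    refine ⟨PySem.Set.union (sites[j]'hj) unit, ?_, ?_⟩
    · exact List.mem_iff_getElem.mpr ⟨j, by simpa using hj, by rw [List.getElem_set]; simp⟩
    · exact (pvUsersOfB_union ud _ unit u).mpr (Or.inl (by simpa using hp))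
  · refine ⟨sites[j], ?_, by simpa using hp⟩
    exact List.mem_iff_getElem.mpr ⟨j, by simpa using hj,
      by rw [List.getElem_set, if_neg (fun h : k = j => hjk h.symm)]⟩

-- the trial's per-user site count, from the current one
theorem pvCnt_trial (ud : PySem.Dict String (PySem.Dict String (List String)))
    (sites : List (List String)) (unit : List String) (k : Nat) (hk : k < sites.length)
    (u : String) :
    pvCnt ud (sites.set k (PySem.Set.union (sites[k]'hk) unit)) u
      = pvCnt ud sites u
        + (if u ∈ pvUsersOfB ud unit ∧ u ∉ pvUsersOfB ud (sites[k]'hk) then 1 else 0) := by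
  have hset := pvCountP_set (List String) [] sites k
    (PySem.Set.union (sites[k]'hk) unit) (fun s => decide (u ∈ pvUsersOfB ud s)) hk
  rw [List.getD_eq_getElem sites [] hk] at hset
  have hun := pvUsersOfB_union ud (sites[k]'hk) unit u
  unfold pvCnt
  by_cases h1 : u ∈ pvUsersOfB ud (sites[k]'hk)
  · have h3 : u ∈ pvUsersOfB ud (PySem.Set.union (sites[k]'hk) unit) := hun.mpr (Or.inl h1)
    rw [if_neg (by tauto)]
    simp [h1, h3] at hset
    omega
  · by_cases h2 : u ∈ pvUsersOfB ud unit
    · have h3 : u ∈ pvUsersOfB ud (PySem.Set.union (sites[k]'hk) unit) := hun.mpr (Or.inr h2)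
      rw [if_pos ⟨h2, h1⟩]
      simp [h1, h3] at hset
      omega
    · have h3 : u ∉ pvUsersOfB ud (PySem.Set.union (sites[k]'hk) unit) :=
        fun hm => (hun.mp hm).elim h1 h2
      rw [if_neg (by tauto)]
      simp [h1, h3] at hset
      omega

theorem pvScoreA_trial (ud : PySem.Dict String (PySem.Dict String (List String))) (n : Int)
    (sites : List (List String)) (sitesOf : PySem.Dict String (List Int))
    (unit : List String) (k : Nat) (hk : k < sites.length)
    (h : pvInv ud n sites sitesOf) :
    pvScoreA ud (sites.set k (PySem.Set.union (sites[k]'hk) unit))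
      = (sitesOf.values.map (fun s => if 1 < s.length then (1 : Int) else 0)).sum
        + ((pvUsersOfB ud unit).map (fun u =>
            if (sitesOf.getD u PySem.Set.empty).length = 1 ∧
               ¬ ((k : Int) ∈ sitesOf.getD u PySem.Set.empty) then (1 : Int) else 0)).sum := by
  unfold pvScoreA
  by_cases hsz : ud.size = 0
  · -- empty user_data: the guard returns 0, and both B-side sums are 0
    simp only [if_pos hsz]
    have hempty : ∀ l, pvUsersOfB ud l = [] := pvUsersOfB_empty_dict ud hsz
    have hvals : ∀ v ∈ sitesOf.values, v = [] := by
      intro v hv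
      rw [PySem.Dict.values_eq_map_keys sitesOf h.2.2.1 PySem.Set.empty] at hv
      obtain ⟨u, _, rfl⟩ := List.mem_map.mp hv
      rw [List.eq_nil_iff_forall_not_mem]
      intro j hj
      obtain ⟨k', hk', rfl, hm⟩ := (h.2.2.2.2 u j).mp hj
      rw [hempty] at hm
      exact List.not_mem_nil hm
    have h1 : (sitesOf.values.map (fun s => if 1 < s.length then (1 : Int) else 0)).sum = 0 := by
      apply List.sum_eq_zero
      intro x hx
      obtain ⟨v, hv, rfl⟩ := List.mem_map.mp hx
      rw [hvals v hv]
      simp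
    rw [h1, hempty unit]
    simp
  · simp only [if_neg hsz, pvUsers_same]
    set T := sites.set k (PySem.Set.union (sites[k]'hk) unit) with hT
    rw [pvAll_eq_ofList_flatten]
    set W := PySem.Set.ofList (T.map (pvUsersOfB ud)).flatten with hW
    have hWnd : W.Nodup := PySem.Set.nodup_ofList _
    have hfix : ∀ u, ((T.map (pvUsersOfB ud)).map
        (fun s => if PySem.Set.contains s u then (1 : Int) else 0)).sum
        = (pvCnt ud T u : Int) := by
      intro u
      rw [PySem.List.sum_map_ite_one_zero (fun s => PySem.Set.contains s u), List.countP_map]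
      unfold pvCnt
      congr 1
      apply List.countP_congr
      intro s _
      simp
    rw [← List.countP_eq_length_filter]
    refine Eq.trans (congrArg Nat.cast
      (List.countP_congr (q := fun u => decide (1 < pvCnt ud T u)) ?_)) ?_
    · intro u _
      simp only [decide_eq_true_eq]
      rw [hfix u]
      constructor <;> intro hx <;> exact_mod_cast hx
    -- split the predicate into "already spanning" and "newly spanning"
    have hsplit : W.countP (fun u => decide (1 < pvCnt ud T u))
        = W.countP (fun u => decide (1 < pvCnt ud sites u))
          + W.countP (fun u => decide (pvCnt ud sites u = 1 ∧
              u ∉ pvUsersOfB ud (sites[k]'hk) ∧ u ∈ pvUsersOfB ud unit)) := by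
      rw [← pvCountP_or String W _ _ ?_]
      · apply List.countP_congr
        intro u _
        have hct := pvCnt_trial ud sites unit k hk u
        rw [← hT] at hct
        by_cases h1 : 1 < pvCnt ud sites u
        · have hgt : 1 < pvCnt ud T u := by rw [hct]; split_ifs <;> omega
          simp [hgt, h1]
        · by_cases h2 : pvCnt ud sites u = 1 ∧ u ∉ pvUsersOfB ud (sites[k]'hk) ∧
              u ∈ pvUsersOfB ud unit
          · have hgt : 1 < pvCnt ud T u := by
              rw [hct, if_pos ⟨h2.2.2, h2.2.1⟩]; omega
            simp [hgt, h2]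
          · have hle : ¬ 1 < pvCnt ud T u := by
              rw [hct]
              rcases Decidable.em (u ∈ pvUsersOfB ud unit ∧
                  u ∉ pvUsersOfB ud (sites[k]'hk)) with hc | hc
              · rw [if_pos hc]
                have hne : ¬ pvCnt ud sites u = 1 := fun he => h2 ⟨he, hc.2, hc.1⟩
                omega
              · rw [if_neg hc]; omega
            simp [hle, h1, h2]
      · intro u _
        rintro ⟨hp, hq⟩
        have hp' := of_decide_eq_true hp
        have hq' := of_decide_eq_true hq
        omega
    rw [hsplit]
    -- first summand: B's running spanning count
    have hfirst : W.countP (fun u => decide (1 < pvCnt ud sites u))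
        = sitesOf.keys.countP (fun u => decide (1 < pvCnt ud sites u)) := by
      apply pvCountP_eq_of_nodup String W sitesOf.keys _ hWnd h.2.2.1
      intro u hu
      have hcnt : 1 < pvCnt ud sites u := of_decide_eq_true hu
      constructor
      · intro _; exact pvInv_mem_keys ud n sites sitesOf h u (by omega)
      · intro _
        rw [hW, pvMem_W]
        exact pvCnt_pos_mem ud sites unit k hk u (by omega)
    -- second summand: B's delta over the unit's users
    have huusnd : (pvUsersOfB ud unit).Nodup := pvUsersOfB_nodup ud unit
    have hsecond : W.countP (fun u => decide (pvCnt ud sites u = 1 ∧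
            u ∉ pvUsersOfB ud (sites[k]'hk) ∧ u ∈ pvUsersOfB ud unit))
        = (pvUsersOfB ud unit).countP (fun u =>
            decide ((sitesOf.getD u PySem.Set.empty).length = 1 ∧
              ¬ ((k : Int) ∈ sitesOf.getD u PySem.Set.empty))) := by
      have h1 : W.countP (fun u => decide (pvCnt ud sites u = 1 ∧
            u ∉ pvUsersOfB ud (sites[k]'hk) ∧ u ∈ pvUsersOfB ud unit))
          = (pvUsersOfB ud unit).countP (fun u => decide (pvCnt ud sites u = 1 ∧
            u ∉ pvUsersOfB ud (sites[k]'hk) ∧ u ∈ pvUsersOfB ud unit)) := by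
        apply pvCountP_eq_of_nodup String W _ _ hWnd huusnd
        intro u hu
        obtain ⟨-, -, hmem⟩ := of_decide_eq_true hu
        constructor
        · intro _; exact hmem
        · intro _
          rw [hW, pvMem_W]
          refine ⟨PySem.Set.union (sites[k]'hk) unit, ?_, ?_⟩
          · exact List.mem_iff_getElem.mpr ⟨k, by rw [hT]; simpa using hk,
              by simp [hT]⟩
          · exact (pvUsersOfB_union ud _ unit u).mpr (Or.inr hmem)
      rw [h1]
      apply List.countP_congr
      intro u hu
      have hlen := pvInv_len ud n sites sitesOf h u
      have hmemk := pvInv_memk ud n sites sitesOf h u k hk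
      rw [List.getD_eq_getElem sites [] hk] at hmemk
      simp only [decide_eq_true_eq]
      constructor
      · rintro ⟨hc, hnm, -⟩; exact ⟨by omega, fun hm => hnm (hmemk.mp hm)⟩
      · rintro ⟨hc, hnm⟩; exact ⟨by omega, fun hm => hnm (hmemk.mpr hm), hu⟩
    rw [hfirst, hsecond]
    rw [pvInv_spanning ud n sites sitesOf h,
      pvSum_ite String (fun u => (sitesOf.getD u PySem.Set.empty).length = 1 ∧
        ¬ ((k : Int) ∈ sitesOf.getD u PySem.Set.empty)) (pvUsersOfB ud unit)]
    push_cast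
    ring

-- ---------- A's per-candidate evaluation equals B's value function ----------

theorem pvGetD_getElem (α : Type) (xs : List α) (k : Nat) (d : α) (hk : k < xs.length) :
    PySem.List.pyGetD xs (k : Int) d = xs[k] := by
  rw [PySem.List.pyGetD_natCast]
  exact List.getD_eq_getElem xs d hk

theorem pvSetD_set (α : Type) (xs : List α) (k : Nat) (v : α) (hk : k < xs.length) :
    PySem.List.pySetD xs (k : Int) v = xs.set k v := by
  unfold PySem.List.pySetD
  rw [PySem.List.pySet?_natCast xs k v hk]
  rfl

theorem pvValueA_eq (ud : PySem.Dict String (PySem.Dict String (List String))) (n : Int)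
    (sites : List (List String)) (sitesOf : PySem.Dict String (List Int))
    (unit : List String) (i : Int) (h : pvInv ud n sites sitesOf)
    (h0 : 0 ≤ i) (hi : i.toNat < sites.length) :
    (let trial := sites.map (fun s => PySem.Set.ofList s)
     let trial := PySem.List.pySetD trial i
       (PySem.Set.union (PySem.List.pyGetD trial i PySem.Set.empty) unit)
     let udv := pvScoreA ud trial
     let lens := trial.map (fun s => (s.length : Int))
     let bal := PySem.List.maxD lens (fun x => x) 0 - PySem.List.minD lens (fun x => x) 0
     udv * 10000 + bal)
    = pvValueB sites sitesOf
        ((sitesOf.values.map (fun s => if 1 < s.length then (1 : Int) else 0)).sum)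
        (pvUsersOfB ud unit) unit n i := by
  obtain ⟨k, rfl⟩ : ∃ k : Nat, i = (k : Int) := ⟨i.toNat, (Int.toNat_of_nonneg h0).symm⟩
  have hk : k < sites.length := by simpa using hi
  have hcopy : sites.map (fun s => PySem.Set.ofList s) = sites := by
    rw [List.map_congr_left (fun s hs => PySem.Set.ofList_eq_self_of_nodup s (h.2.1 s hs))]
    exact List.map_id' sites
  simp only [hcopy]
  rw [pvGetD_getElem _ sites k _ hk, pvSetD_set _ sites k _ hk]
  rw [pvScoreA_trial ud n sites sitesOf unit k hk h]
  unfold pvValueB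
  simp only []
  have hlens : (sites.set k (PySem.Set.union (sites[k]'hk) unit)).map (fun s => (s.length : Int))
      = (PySem.List.pyRange 0 n 1).map (fun j =>
          if j = (k : Int)
          then ((PySem.Set.union (PySem.List.pyGetD sites (k : Int) PySem.Set.empty) unit).length : Int)
          else ((PySem.List.pyGetD sites j PySem.Set.empty).length : Int)) := by
    apply List.ext_getElem
    · rw [List.length_map, List.length_set, h.1, List.length_map, pvRange_len]
    · intro j hj1 hj2
      have hjlen : j < sites.length := by simpa using hj1
      rw [List.getElem_map, List.getElem_map, PySem.List.getElem_pyRange_one]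
      have h0j : (0 : Int) + (j : Int) = (j : Int) := by ring
      rw [h0j, List.getElem_set]
      by_cases hjk : j = k
      · subst hjk
        rw [if_pos rfl, if_pos rfl, pvGetD_getElem _ sites j _ hjlen]
      · rw [if_neg (fun hh : k = j => hjk hh.symm),
          if_neg (fun hh : (j : Int) = (k : Int) => hjk (by exact_mod_cast hh)),
          pvGetD_getElem _ sites j _ hjlen]
  rw [hlens]
  ring

-- ---------- argmin: A's running minimum = min(range, key=…) ----------

theorem pvFoldMin_aux (f : Int → Int) : ∀ (t : List Int) (m : Int),
    ∃ r, t.foldl (fun acc x => match acc with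
          | none => some x
          | some m => if f x < f m then some x else some m) (some m) = some r ∧
        t.foldl (fun (b : Int × Option Int) i => match b.2 with
          | none => (i, some (f i))
          | some bv => if f i < bv then (i, some (f i)) else b) (m, some (f m)) = (r, some (f r)) := by
  intro t
  induction t with
  | nil => intro m; exact ⟨m, rfl, rfl⟩
  | cons x t ih =>
      intro m
      by_cases hx : f x < f m
      · obtain ⟨r, h1, h2⟩ := ih x
        exact ⟨r, by simpa [hx] using h1, by simpa [hx] using h2⟩
      · obtain ⟨r, h1, h2⟩ := ih m
        exact ⟨r, by simpa [hx] using h1, by simpa [hx] using h2⟩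

theorem pvFoldMin (l : List Int) (f : Int → Int) :
    (l.foldl (fun (b : Int × Option Int) i => match b.2 with
        | none => (i, some (f i))
        | some bv => if f i < bv then (i, some (f i)) else b) ((0 : Int), (none : Option Int))).1
      = PySem.List.minD l f 0 := by
  cases l with
  | nil => rfl
  | cons x t =>
      obtain ⟨r, h1, h2⟩ := pvFoldMin_aux f t x
      show (t.foldl _ (x, some (f x))).1 = _
      rw [h2]
      show r = (PySem.List.min? (x :: t) f).getD 0
      have : PySem.List.min? (x :: t) f = t.foldl (fun acc x => match acc with
          | none => some x
          | some m => if f x < f m then some x else some m) (some x) := by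
        simp only [PySem.List.min?, List.foldl_cons]
        apply PySem.List.foldl_congr_mem
        intro acc y _
        cases acc <;> rfl
      rw [this, h1]
      rfl

-- ---------- one greedy step: A's placement = B's placement, invariant preserved ----------

theorem pvGetD_set (α : Type) (l : List α) (k j : Nat) (v d : α)
    (_hk : k < l.length) (hj : j < l.length) :
    (l.set k v).getD j d = if k = j then v else l.getD j d := by
  rw [List.getD_eq_getElem _ d (show j < (l.set k v).length by simpa using hj),
    List.getElem_set]
  by_cases hkj : k = j
  · simp [hkj]
  · rw [if_neg hkj, if_neg hkj, List.getD_eq_getElem l d hj]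

-- the update loop `for u in uusers: sites_of.setdefault(u, set()).add(best)` pointwise
theorem pvFoldModify_getD (b : Int) : ∀ (l : List String)
    (d : PySem.Dict String (List Int)) (u : String), l.Nodup →
    (l.foldl (fun d u => d.modify u PySem.Set.empty (fun s => PySem.Set.add s b)) d).getD u
        PySem.Set.empty
      = if u ∈ l then PySem.Set.add (d.getD u PySem.Set.empty) b
        else d.getD u PySem.Set.empty := by
  intro l
  induction l with
  | nil => intro d u _; simp
  | cons x t ih =>
      intro d u hnd
      have hxt : x ∉ t := (List.nodup_cons.mp hnd).1
      simp only [List.foldl_cons]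
      rw [ih _ u hnd.of_cons, PySem.Dict.getD_modify]
      by_cases hut : u ∈ t
      · have hux : ¬ (u = x) := fun hh => hxt (hh ▸ hut)
        simp [hut, hux, List.mem_cons]
      · by_cases hux : u = x
        · subst hux
          simp [hut]
        · simp [hut, hux, List.mem_cons]

theorem pvStep (ud : PySem.Dict String (PySem.Dict String (List String))) (n : Int)
    (hn : 1 ≤ n) (sites : List (List String)) (sitesOf : PySem.Dict String (List Int))
    (unit : List String) (h : pvInv ud n sites sitesOf) :
    pvPlaceUnitA ud n sites unit = (pvPlaceUnitB ud n (sites, sitesOf) unit).1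
      ∧ pvInv ud n (pvPlaceUnitB ud n (sites, sitesOf) unit).1
          (pvPlaceUnitB ud n (sites, sitesOf) unit).2 := by
  have hlen := h.1
  unfold pvPlaceUnitA pvPlaceUnitB
  simp only []
  have hcong : (PySem.List.pyRange 0 n 1).foldl (fun (best : Int × Option Int) i =>
      let trial := sites.map (fun s => PySem.Set.ofList s)
      let trial := PySem.List.pySetD trial i
        (PySem.Set.union (PySem.List.pyGetD trial i PySem.Set.empty) unit)
      let udv := pvScoreA ud trial
      let lens := trial.map (fun s => (s.length : Int))
      let bal := PySem.List.maxD lens (fun x => x) 0 - PySem.List.minD lens (fun x => x) 0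
      let v := udv * 10000 + bal
      match best.2 with
      | none => (i, some v)
      | some bv => if v < bv then (i, some v) else best) ((0 : Int), (none : Option Int))
    = (PySem.List.pyRange 0 n 1).foldl (fun (best : Int × Option Int) i =>
      match best.2 with
      | none => (i, some (pvValueB sites sitesOf
          ((sitesOf.values.map (fun s => if 1 < s.length then (1 : Int) else 0)).sum)
          (pvUsersOfB ud unit) unit n i))
      | some bv => if pvValueB sites sitesOf
          ((sitesOf.values.map (fun s => if 1 < s.length then (1 : Int) else 0)).sum)
          (pvUsersOfB ud unit) unit n i < bv
          then (i, some (pvValueB sites sitesOf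
            ((sitesOf.values.map (fun s => if 1 < s.length then (1 : Int) else 0)).sum)
            (pvUsersOfB ud unit) unit n i)) else best)
      ((0 : Int), (none : Option Int)) := by
    apply PySem.List.foldl_congr_mem
    intro acc i hi
    obtain ⟨hi0, hin⟩ := PySem.List.mem_pyRange_one.mp hi
    have hv := pvValueA_eq ud n sites sitesOf unit i h hi0 (by omega)
    simp only [] at hv ⊢
    rw [hv]
  rw [hcong, pvFoldMin (PySem.List.pyRange 0 n 1) (fun i => pvValueB sites sitesOf
      ((sitesOf.values.map (fun s => if 1 < s.length then (1 : Int) else 0)).sum)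
      (pvUsersOfB ud unit) unit n i)]
  set b := PySem.List.minD (PySem.List.pyRange 0 n 1) (fun i => pvValueB sites sitesOf
      ((sitesOf.values.map (fun s => if 1 < s.length then (1 : Int) else 0)).sum)
      (pvUsersOfB ud unit) unit n i) 0 with hb
  have hbmem : b ∈ PySem.List.pyRange 0 n 1 := by
    cases hmin : PySem.List.min? (PySem.List.pyRange 0 n 1) (fun i => pvValueB sites sitesOf
        ((sitesOf.values.map (fun s => if 1 < s.length then (1 : Int) else 0)).sum)
        (pvUsersOfB ud unit) unit n i) with
    | none =>
        have hnil := (PySem.List.min?_eq_none_iff _ _).mp hmin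
        have := pvRange_len n
        rw [hnil] at this
        simp at this
        omega
    | some m =>
        have hm := PySem.List.min?_mem hmin
        have hbe : b = m := by
          rw [hb]
          unfold PySem.List.minD
          rw [hmin]
          rfl
        rw [hbe]
        exact hm
  obtain ⟨hb0, hbn⟩ := PySem.List.mem_pyRange_one.mp hbmem
  obtain ⟨kb, hkb⟩ : ∃ kb : Nat, b = (kb : Int) := ⟨b.toNat, (Int.toNat_of_nonneg hb0).symm⟩
  have hkbl : kb < sites.length := by rw [hlen]; omega
  have hS' : PySem.List.pySetD sites b
      (PySem.Set.union (PySem.List.pyGetD sites b PySem.Set.empty) unit)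
      = sites.set kb (PySem.Set.union (sites[kb]'hkbl) unit) := by
    rw [hkb, pvGetD_getElem _ sites kb _ hkbl, pvSetD_set _ sites kb _ hkbl]
  have huusnd : (pvUsersOfB ud unit).Nodup := pvUsersOfB_nodup ud unit
  refine ⟨rfl, ?_⟩
  rw [hS']
  refine ⟨by simpa using hlen, ?_, ?_, ?_, ?_⟩
  · -- every site stays duplicate-free
    intro s hs
    rcases List.mem_or_eq_of_mem_set hs with hs' | rfl
    · exact h.2.1 s hs'
    · exact PySem.Set.nodup_union _ _ (h.2.1 _ (List.getElem_mem hkbl))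
  · -- keys stay unique through the modify loop
    exact PySem.Dict.nodup_keys_foldl_modify_key (pvUsersOfB ud unit) (fun u => u)
      PySem.Set.empty (fun _ _ => fun s => PySem.Set.add s b) sitesOf h.2.2.1
  · -- every per-user site set stays duplicate-free
    intro u
    rw [pvFoldModify_getD b (pvUsersOfB ud unit) sitesOf u huusnd]
    by_cases hu : u ∈ pvUsersOfB ud unit
    · rw [if_pos hu]
      exact PySem.Set.nodup_add _ _ (h.2.2.2.1 u)
    · rw [if_neg hu]
      exact h.2.2.2.1 u
  · -- the membership characterisation survives the placement
    intro u j
    rw [pvFoldModify_getD b (pvUsersOfB ud unit) sitesOf u huusnd]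
    have hgs : ∀ (k' : Nat), k' < sites.length →
        (sites.set kb (PySem.Set.union (sites[kb]'hkbl) unit)).getD k' []
          = if kb = k' then PySem.Set.union (sites[kb]'hkbl) unit else sites.getD k' [] :=
      fun k' hk' => pvGetD_set _ sites kb k' _ [] hkbl hk'
    by_cases hu : u ∈ pvUsersOfB ud unit
    · rw [if_pos hu, PySem.Set.mem_add]
      constructor
      · rintro (hj | rfl)
        · obtain ⟨k', hk', rfl, hm⟩ := (h.2.2.2.2 u _).mp hj
          refine ⟨k', by simpa using hk', rfl, ?_⟩
          rw [hgs k' hk']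
          by_cases hkk : kb = k'
          · subst hkk
            rw [if_pos rfl]
            refine (pvUsersOfB_union ud _ unit u).mpr (Or.inl ?_)
            rw [← List.getD_eq_getElem sites [] hkbl]
            exact hm
          · rw [if_neg hkk]
            exact hm
        · refine ⟨kb, by simpa using hkbl, hkb, ?_⟩
          rw [hgs kb hkbl, if_pos rfl]
          exact (pvUsersOfB_union ud _ unit u).mpr (Or.inr hu)
      · rintro ⟨k', hk'', rfl, hm⟩
        have hk' : k' < sites.length := by simpa using hk''
        rw [hgs k' hk'] at hm
        by_cases hkk : kb = k'
        · subst hkk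
          rw [if_pos rfl] at hm
          rcases (pvUsersOfB_union ud _ unit u).mp hm with hm1 | hm2
          · refine Or.inl ((h.2.2.2.2 u _).mpr ⟨kb, hkbl, rfl, ?_⟩)
            rw [List.getD_eq_getElem sites [] hkbl]
            exact hm1
          · exact Or.inr hkb.symm
        · rw [if_neg hkk] at hm
          exact Or.inl ((h.2.2.2.2 u _).mpr ⟨k', hk', rfl, hm⟩)
    · rw [if_neg hu, h.2.2.2.2 u j]
      constructor
      · rintro ⟨k', hk', rfl, hm⟩
        refine ⟨k', by simpa using hk', rfl, ?_⟩
        rw [hgs k' hk']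
        by_cases hkk : kb = k'
        · subst hkk
          rw [if_pos rfl]
          refine (pvUsersOfB_union ud _ unit u).mpr (Or.inl ?_)
          rw [← List.getD_eq_getElem sites [] hkbl]
          exact hm
        · rw [if_neg hkk]
          exact hm
      · rintro ⟨k', hk'', rfl, hm⟩
        have hk' : k' < sites.length := by simpa using hk''
        rw [hgs k' hk'] at hm
        by_cases hkk : kb = k'
        · subst hkk
          rw [if_pos rfl] at hm
          rcases (pvUsersOfB_union ud _ unit u).mp hm with hm1 | hm2
          · refine ⟨kb, hkbl, rfl, ?_⟩
            rw [List.getD_eq_getElem sites [] hkbl]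
            exact hm1
          · exact absurd hm2 hu
        · rw [if_neg hkk] at hm
          exact ⟨k', hk', rfl, hm⟩

-- ---------- the grouping loop, split into its two components ----------

theorem pvGroup_split (pcD : PySem.Dict String String) :
    ∀ (l : List String) (d : PySem.Dict String (List String)) (u : PySem.Set String),
    l.foldl (fun st proj => if pcD.getD proj "" ≠ "" then
        (st.1.modify (pcD.getD proj "") PySem.Set.empty (fun s => PySem.Set.add s proj), st.2)
      else (st.1, PySem.Set.add st.2 proj)) (d, u)
    = ((l.filter (fun p => decide (pcD.getD p "" ≠ ""))).foldl
         (fun d p => d.modify (pcD.getD p "") PySem.Set.empty (fun s => PySem.Set.add s p)) d,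
       (l.filter (fun p => !(decide (pcD.getD p "" ≠ "")))).foldl PySem.Set.add u) := by
  intro l
  induction l with
  | nil => intro d u; rfl
  | cons p t ih =>
      intro d u
      by_cases hp : pcD.getD p "" ≠ ""
      · rw [List.foldl_cons, if_pos hp, ih,
          List.filter_cons_of_pos (by simpa using hp),
          List.filter_cons_of_neg (by simp [hp]),
          List.foldl_cons]
      · rw [List.foldl_cons, if_neg hp, ih,
          List.filter_cons_of_neg (by simpa using hp),
          List.filter_cons_of_pos (by simp [hp]),
          List.foldl_cons]

theorem pvByCat_getD (pcD : PySem.Dict String String) (c : String) (_hc : c ≠ "") :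
    ∀ (l : List String) (d : PySem.Dict String (List String)),
    l.Nodup → (∀ p ∈ l, p ∉ d.getD c PySem.Set.empty) →
    (l.foldl (fun d p => d.modify (pcD.getD p "") PySem.Set.empty
        (fun s => PySem.Set.add s p)) d).getD c PySem.Set.empty
      = d.getD c PySem.Set.empty ++ l.filter (fun p => pcD.getD p "" == c) := by
  intro l
  induction l with
  | nil => intro d _ _; simp
  | cons p t ih =>
      intro d hnd hnotin
      have hndt : t.Nodup := hnd.of_cons
      have hpt : p ∉ t := by
        intro h
        exact (List.nodup_cons.mp hnd).1 h
      by_cases hcp : pcD.getD p "" = c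
      · have hmod : (d.modify (pcD.getD p "") PySem.Set.empty
            (fun s => PySem.Set.add s p)).getD c PySem.Set.empty
            = d.getD c PySem.Set.empty ++ [p] := by
          rw [hcp, PySem.Dict.getD_modify_self]
          exact PySem.Set.add_of_not_mem (hnotin p (by simp))
        simp only [List.foldl_cons]
        rw [ih _ hndt ?_]
        · rw [hmod, List.filter_cons_of_pos (by simp [hcp])]
          simp
        · intro q hq
          rw [hmod]
          intro hmem
          rcases List.mem_append.mp hmem with h | h
          · exact hnotin q (by simp [hq]) h
          · simp at h
            subst h
            exact hpt hq
      · have hmod : (d.modify (pcD.getD p "") PySem.Set.empty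
            (fun s => PySem.Set.add s p)).getD c PySem.Set.empty
            = d.getD c PySem.Set.empty :=
          PySem.Dict.getD_modify_of_ne d _ _ (fun h => hcp h.symm)
        simp only [List.foldl_cons]
        rw [ih _ hndt ?_]
        · rw [hmod, List.filter_cons_of_neg (by simp [hcp])]
        · intro q hq
          rw [hmod]
          exact hnotin q (by simp [hq])

-- ---------- the units lists of the two ports coincide under Pre_ ----------

theorem pvSortedRev_append_ones (cats sings : List (List String))
    (h1 : ∀ u ∈ cats, 1 ≤ u.length) (hs : ∀ u ∈ sings, u.length = 1) :
    PySem.List.sorted (cats ++ sings) (fun u => (u.length : Int)) true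
      = PySem.List.sorted cats (fun u => (u.length : Int)) true ++ sings := by
  have aux : ∀ (ss : List (List String)) (acc : List (List String)),
      (∀ y ∈ acc, 1 ≤ y.length) → (∀ u ∈ ss, u.length = 1) →
      ss.foldl (fun acc x => PySem.List.insertBy
        (fun a b => decide ((b.length : Int) < (a.length : Int))) x acc) acc = acc ++ ss := by
    intro ss
    induction ss with
    | nil => intro acc _ _; simp
    | cons x t ih =>
        intro acc hacc hones
        have hx : x.length = 1 := hones x (by simp)
        have hins : PySem.List.insertBy
            (fun a b => decide ((b.length : Int) < (a.length : Int))) x acc = acc ++ [x] := by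
          apply PySem.List.insertBy_of_forall_not_before
          intro y hy
          have h1y : 1 ≤ y.length := hacc y hy
          simp only [hx, decide_eq_false_iff_not]
          push_cast
          omega
        simp only [List.foldl_cons, hins]
        rw [ih (acc ++ [x]) ?_ ?_]
        · simp
        · intro y hy
          rcases List.mem_append.mp hy with h | h
          · exact hacc y h
          · simp at h
            subst h
            omega
        · intro u hu
          exact hones u (by simp [hu])
  rw [PySem.List.sorted_rev_eq_foldl_insertBy, List.foldl_append,
      ← PySem.List.sorted_rev_eq_foldl_insertBy]
  exact aux sings _ (fun y hy => h1 y ((PySem.List.mem_sorted _ _ _ y).mp hy)) hs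

theorem pvSortedRev_presort (cats : List (List String)) (mk : List String → String)
    (hd : (cats.map (fun u => (u.length : Int))).Nodup) :
    PySem.List.sorted (PySem.List.sorted cats mk false) (fun u => (u.length : Int)) true
      = PySem.List.sorted cats (fun u => (u.length : Int)) true := by
  apply PySem.List.sorted_rev_eq_of_perm_of_pairwise_gt
  · exact (PySem.List.sorted_perm cats _ true).trans (PySem.List.sorted_perm cats mk false).symm
  · have hle := PySem.List.sorted_pairwise_rev cats (fun u => (u.length : Int))
    have hperm : ((PySem.List.sorted cats (fun u => (u.length : Int)) true).map
        (fun u => (u.length : Int))).Perm (cats.map (fun u => (u.length : Int))) :=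
      (PySem.List.sorted_perm cats _ true).map _
    have hnd : ((PySem.List.sorted cats (fun u => (u.length : Int)) true).map
        (fun u => (u.length : Int))).Nodup := hperm.nodup_iff.mpr hd
    have hne : (PySem.List.sorted cats (fun u => (u.length : Int)) true).Pairwise
        (fun a b => (a.length : Int) ≠ (b.length : Int)) := List.pairwise_map.mp hnd
    exact (hle.and hne).imp (fun {a b} h => lt_of_le_of_ne h.1 (fun e => h.2 e.symm))

theorem pvByCat_values (pcD : PySem.Dict String String) (l : List String) (hl : l.Nodup) :
    ((l.filter (fun p => decide (pcD.getD p "" ≠ ""))).foldl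
        (fun d p => d.modify (pcD.getD p "") PySem.Set.empty (fun s => PySem.Set.add s p))
        PySem.Dict.empty).values
    = (PySem.Set.ofList ((l.filter (fun p => decide (pcD.getD p "" ≠ ""))).map
        (fun p => pcD.getD p ""))).map
        (fun c => (l.filter (fun p => decide (pcD.getD p "" ≠ ""))).filter
          (fun p => pcD.getD p "" == c)) := by
  have hnlf : (l.filter (fun p => decide (pcD.getD p "" ≠ ""))).Nodup := hl.filter _
  have hkeys : ((l.filter (fun p => decide (pcD.getD p "" ≠ ""))).foldl
      (fun d p => d.modify (pcD.getD p "") PySem.Set.empty (fun s => PySem.Set.add s p))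
      PySem.Dict.empty).keys
      = PySem.Set.ofList ((l.filter (fun p => decide (pcD.getD p "" ≠ ""))).map
          (fun p => pcD.getD p "")) := by
    rw [PySem.Dict.keys_foldl_modify_key _ (fun p => pcD.getD p "") PySem.Set.empty
      (fun _ p => fun s => PySem.Set.add s p) PySem.Dict.empty]
    rw [PySem.Dict.keys_empty, PySem.Set.update_nil_left]
  have hknd : ((l.filter (fun p => decide (pcD.getD p "" ≠ ""))).foldl
      (fun d p => d.modify (pcD.getD p "") PySem.Set.empty (fun s => PySem.Set.add s p))
      PySem.Dict.empty).keys.Nodup := by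
    rw [hkeys]; exact PySem.Set.nodup_ofList _
  rw [PySem.Dict.values_eq_map_keys _ hknd PySem.Set.empty, hkeys]
  apply List.map_congr_left
  intro c hc
  have hc' : c ≠ "" := by
    obtain ⟨p, hp, rfl⟩ := List.mem_map.mp ((PySem.Set.mem_ofList _ _).mp hc)
    simpa using List.of_mem_filter hp
  rw [pvByCat_getD pcD c hc' _ PySem.Dict.empty hnlf
    (by intro p _; simp [PySem.Dict.getD_empty])]
  simp [PySem.Dict.getD_empty]

theorem pvFilter_count (project_categories : List (String × String)) (pk : List String)
    (c : String) (hc : c ≠ "") :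
    (((PySem.Set.ofList pk).filter
        (fun p => decide ((PySem.Dict.ofList project_categories).getD p "" ≠ ""))).filter
        (fun p => (PySem.Dict.ofList project_categories).getD p "" == c)).length
      = pvCatCount pk project_categories c := by
  unfold pvCatCount pvCatOf
  rw [← List.countP_eq_length_filter, List.countP_filter]
  apply List.countP_congr
  intro p _
  by_cases h : (PySem.Dict.ofList project_categories).getD p "" = c
  · simp [h, hc]
  · simp [h]

theorem pvUnits_eq (project_categories : List (String × String)) (pk : List String)
    (h3 : ∀ p ∈ pk, ∀ q ∈ pk,
      pvCatOf project_categories p ≠ "" → pvCatOf project_categories q ≠ "" →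
      pvCatOf project_categories p ≠ pvCatOf project_categories q →
      pvCatCount pk project_categories (pvCatOf project_categories p) ≠
        pvCatCount pk project_categories (pvCatOf project_categories q)) :
    (let pcD := PySem.Dict.ofList project_categories
     let keys : PySem.Set String := PySem.Set.ofList pk
     let st := keys.foldl (fun (st : PySem.Dict String (List String) × PySem.Set String) proj =>
        let cat := pcD.getD proj ""
        if cat ≠ "" then (st.1.modify cat PySem.Set.empty (fun s => PySem.Set.add s proj), st.2)
        else (st.1, PySem.Set.add st.2 proj)) (PySem.Dict.empty, PySem.Set.empty)
     let sings := (PySem.List.sorted st.2 (fun x => x) false).map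
        (fun p => PySem.Set.add PySem.Set.empty p)
     PySem.List.sorted (st.1.values ++ sings) (fun u => (u.length : Int)) true
      = PySem.List.sorted (PySem.List.sorted st.1.values
          (fun u => (PySem.List.min? u (fun x => x)).getD "") false)
          (fun u => (u.length : Int)) true ++ sings) := by
  simp only []
  rw [pvGroup_split]
  rw [pvByCat_values (PySem.Dict.ofList project_categories) (PySem.Set.ofList pk)
    (PySem.Set.nodup_ofList pk)]
  have hcats1 : ∀ u ∈ (PySem.Set.ofList ((((PySem.Set.ofList pk)).filter
      (fun p => decide ((PySem.Dict.ofList project_categories).getD p "" ≠ ""))).map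
        (fun p => (PySem.Dict.ofList project_categories).getD p ""))).map
        (fun c => (((PySem.Set.ofList pk)).filter
          (fun p => decide ((PySem.Dict.ofList project_categories).getD p "" ≠ ""))).filter
          (fun p => (PySem.Dict.ofList project_categories).getD p "" == c)),
      1 ≤ u.length := by
    intro u hu
    obtain ⟨c, hcm, rfl⟩ := List.mem_map.mp hu
    obtain ⟨p, hp, hpc⟩ := List.mem_map.mp ((PySem.Set.mem_ofList _ _).mp hcm)
    have hpm : p ∈ (((PySem.Set.ofList pk)).filter
        (fun p => decide ((PySem.Dict.ofList project_categories).getD p "" ≠ ""))).filter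
        (fun p => (PySem.Dict.ofList project_categories).getD p "" == c) :=
      List.mem_filter.mpr ⟨hp, by simp [hpc]⟩
    have := List.length_pos_of_mem hpm
    omega
  have hd : (((PySem.Set.ofList ((((PySem.Set.ofList pk)).filter
      (fun p => decide ((PySem.Dict.ofList project_categories).getD p "" ≠ ""))).map
        (fun p => (PySem.Dict.ofList project_categories).getD p ""))).map
        (fun c => (((PySem.Set.ofList pk)).filter
          (fun p => decide ((PySem.Dict.ofList project_categories).getD p "" ≠ ""))).filter
          (fun p => (PySem.Dict.ofList project_categories).getD p "" == c))).map
          (fun u => (u.length : Int))).Nodup := by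
    rw [List.map_map]
    apply List.Nodup.map_on ?_ (PySem.Set.nodup_ofList _)
    intro c1 hm1 c2 hm2 heq
    by_contra hne
    obtain ⟨p1, hp1, hpc1⟩ := List.mem_map.mp ((PySem.Set.mem_ofList _ _).mp hm1)
    obtain ⟨p2, hp2, hpc2⟩ := List.mem_map.mp ((PySem.Set.mem_ofList _ _).mp hm2)
    have hc1 : c1 ≠ "" := by
      subst hpc1; simpa using List.of_mem_filter hp1
    have hc2 : c2 ≠ "" := by
      subst hpc2; simpa using List.of_mem_filter hp2
    have hp1k : p1 ∈ pk := by
      have := List.mem_of_mem_filter hp1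
      exact (PySem.Set.mem_ofList _ _).mp this
    have hp2k : p2 ∈ pk := by
      have := List.mem_of_mem_filter hp2
      exact (PySem.Set.mem_ofList _ _).mp this
    have hcnt := h3 p1 hp1k p2 hp2k
    unfold pvCatOf at hcnt
    rw [hpc1, hpc2] at hcnt
    have hcnt' := hcnt hc1 hc2 hne
    apply hcnt'
    have e1 := pvFilter_count project_categories pk c1 hc1
    have e2 := pvFilter_count project_categories pk c2 hc2
    rw [← e1, ← e2]
    simpa using heq
  have hsones : ∀ u ∈ (PySem.List.sorted ((((PySem.Set.ofList pk)).filter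
      (fun p => !(decide ((PySem.Dict.ofList project_categories).getD p "" ≠ "")))).foldl
        PySem.Set.add PySem.Set.empty) (fun x => x) false).map
        (fun p => PySem.Set.add PySem.Set.empty p), u.length = 1 := by
    intro u hu
    obtain ⟨p, _, rfl⟩ := List.mem_map.mp hu
    simp [PySem.Set.add]
  rw [pvSortedRev_presort _ _ hd]
  exact pvSortedRev_append_ones _ _ hcats1 hsones

-- ---------- plumbing: the whole greedy loop, in lock-step ----------

theorem pvInv_init (ud : PySem.Dict String (PySem.Dict String (List String))) (n : Int) :
    pvInv ud n ((PySem.List.pyRange 0 n 1).map (fun _ => PySem.Set.empty)) PySem.Dict.empty := by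
  have hz : ∀ k : Nat,
      ((PySem.List.pyRange 0 n 1).map (fun _ => (PySem.Set.empty : List String))).getD k [] = [] := by
    intro k
    rw [List.getD_eq_getElem?_getD]
    cases h : ((PySem.List.pyRange 0 n 1).map fun _ => (PySem.Set.empty : List String))[k]? with
    | none => rfl
    | some v =>
        have hv := List.mem_of_getElem? h
        obtain ⟨_, _, rfl⟩ := List.mem_map.mp hv
        rfl
  refine ⟨by rw [List.length_map, pvRange_len], ?_, PySem.Dict.nodup_keys_empty, ?_, ?_⟩
  · intro s hs
    obtain ⟨_, _, rfl⟩ := List.mem_map.mp hs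
    exact List.nodup_nil
  · intro u
    rw [PySem.Dict.getD_empty]
    exact List.nodup_nil
  · intro u j
    rw [PySem.Dict.getD_empty]
    refine iff_of_false (by simp [PySem.Set.empty]) ?_
    rintro ⟨k, hk, rfl, hm⟩
    rw [hz k] at hm
    simp [pvUsersOfB, PySem.Set.empty] at hm

theorem pvFold_eq (ud : PySem.Dict String (PySem.Dict String (List String))) (n : Int)
    (hn : 1 ≤ n) : ∀ (us : List (List String)) (sites : List (List String))
    (sitesOf : PySem.Dict String (List Int)), pvInv ud n sites sitesOf →
    us.foldl (pvPlaceUnitA ud n) sites = (us.foldl (pvPlaceUnitB ud n) (sites, sitesOf)).1 := by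
  intro us
  induction us with
  | nil => intro sites sitesOf _; rfl
  | cons u t ih =>
      intro sites sitesOf h
      obtain ⟨he, hinv⟩ := pvStep ud n hn sites sitesOf u h
      simp only [List.foldl_cons, he]
      exact ih _ _ hinv

-- ===== VERDICT (by name: the statement is the Claim_ definition above) =====
theorem category_first_partition_py_spec : Claim_equal_category_first_partition_py := by
  intro pk pc ud n _ hpre
  obtain ⟨h1, _, h3⟩ := hpre
  unfold Spec_category_first_partition_py category_first_partition_py
    category_first_partition_py_alt
  simp only []
  have hunits := pvUnits_eq pc pk h3
  simp only [] at hunits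
  rw [hunits]
  rcases h1 with hn | hpk
  · exact congrArg (List.filter _)
      (pvFold_eq (pvUdDict ud) n hn _ _ PySem.Dict.empty (pvInv_init (pvUdDict ud) n))
  · subst hpk
    rfl
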